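-- pv_equiv track=rewrite | github.com/AnqiXu7/Lyapunov-ML-PowerSystems | Code/PSLY/Lyfunction/02_extract.py | encode_base1000
-- ===== SOURCE A (Python) =====
-- def encode_base1000(n):
--     """
--     Convert an integer into base-1000 token representation.
--
--     Example:
--         1234567 -> "1 234 567"
--     """
--     if n == 0:
--         return "0"
--
--     chunks = []
--     n = abs(int(n))
--
--     while n > 0:
--         chunks.append(str(n % 1000))
--         n //= 1000
--
--     return " ".join(reversed(chunks))
-- ===== SOURCE B (Python) =====
-- def encode_base1000(n):
--     """Group the decimal string of |n| into 3-char blocks instead of mod/div peeling."""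
--     if n == 0:
--         return "0"
--     s = str(abs(int(n)))
--     s = "0" * (-len(s) % 3) + s
--     return " ".join(s[i:i + 3].lstrip("0") or "0" for i in range(0, len(s), 3))
-- ===== Notes on version B (the rewrite author's own statement) =====
-- stated objective: idiomatic
-- what changed: B replaces the mod/div peeling loop with list reversal by computing the decimal string of |n| once, left-padding it with zeros to a length divisible by three, and joining its three-character slices (each stripped of leading zeros) front to back.
import Mathlib
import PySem

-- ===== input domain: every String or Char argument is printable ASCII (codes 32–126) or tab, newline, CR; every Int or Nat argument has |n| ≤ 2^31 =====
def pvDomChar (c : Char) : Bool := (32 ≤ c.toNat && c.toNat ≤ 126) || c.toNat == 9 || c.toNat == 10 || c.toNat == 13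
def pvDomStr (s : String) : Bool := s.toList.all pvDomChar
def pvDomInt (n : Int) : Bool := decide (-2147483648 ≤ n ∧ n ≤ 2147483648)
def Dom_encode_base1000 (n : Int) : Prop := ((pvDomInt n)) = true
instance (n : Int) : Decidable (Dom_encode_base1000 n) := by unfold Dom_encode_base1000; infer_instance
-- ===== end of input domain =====

-- B groups the decimal string of |n| into 3-char blocks instead of A's mod/div peeling loop; same values, idiomatic rewrite.

-- ===== PORT A =====
-- while n > 0: chunks.append(str(n % 1000)); n //= 1000
def pvLoopA (m : Int) (chunks : List String) : List String :=
  if h : 0 < m then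
    pvLoopA (PySem.Int.floordiv m 1000) (chunks ++ [PySem.Int.toStr (PySem.Int.mod m 1000)])
  else chunks
termination_by m.toNat
decreasing_by
  have h1 : PySem.Int.floordiv m 1000 = m / 1000 := PySem.Int.floordiv_eq_ediv_of_pos (by norm_num)
  have h2 : 0 ≤ m / 1000 := Int.ediv_nonneg (le_of_lt h) (by norm_num)
  have h3 : m / 1000 < m := Int.ediv_lt_of_lt_mul (by norm_num) (by omega)
  omega

def encode_base1000 (n : Int) : String :=
  if n == 0 then "0"
  else PySem.Str.join " " (pvLoopA |n| []).reverse

-- ===== PORT B =====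
-- block.lstrip("0") or "0"  (lstrip("0") ported by hand as dropWhile of '0'-membership — exact for this call)
def pvStripOr0 (b : List Char) : List Char :=
  let t := b.dropWhile (fun c => ['0'].contains c)
  if t.isEmpty then ['0'] else t

def encode_base1000_alt (n : Int) : String :=
  if n == 0 then "0"
  else
    let s0 := PySem.Int.toChars |n|
    let s := List.replicate ((PySem.Int.mod (-(s0.length : Int)) 3).toNat) '0' ++ s0
    PySem.Str.join " "
      ((PySem.List.pyRange 0 (s.length : Int) 3).map
        (fun i => String.ofList (pvStripOr0 (PySem.List.slice s (some i) (some (i + 3))))))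

-- ===== PRECONDITION & SPEC =====
def Spec_encode_base1000 (n : Int) (out : String) : Prop := out = encode_base1000_alt n
instance (n : Int) (out : String) : Decidable (Spec_encode_base1000 n out) := by unfold Spec_encode_base1000; infer_instance

-- ===== CLAIM (what is proved, stated in full; the proofs are below) =====
def Claim_equal_encode_base1000 : Prop := ∀ (n : Int), Dom_encode_base1000 n → Spec_encode_base1000 n (encode_base1000 n)

-- ===== LEMMAS AND PROOFS =====

-- clean big-endian decimal recursion (proof-side characterisation of Nat.toDigits 10)
def pvDigs (m : Nat) : List Char :=
  if _h : m < 10 then [Nat.digitChar m]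
  else pvDigs (m / 10) ++ [Nat.digitChar (m % 10)]
termination_by m
decreasing_by exact Nat.div_lt_self (by omega) (by norm_num)

-- the common token list (big endian base-1000 chunks, as strings)
def pvT (m : Nat) : List String :=
  if _h : m < 1000 then [String.ofList (pvDigs m)]
  else pvT (m / 1000) ++ [String.ofList (pvDigs (m % 1000))]
termination_by m
decreasing_by exact Nat.div_lt_self (by omega) (by norm_num)

def pvPad3 (cs : List Char) : List Char := List.replicate (3 - cs.length) '0' ++ cs

theorem pvDigs_lt10 (m : Nat) (h : m < 10) : pvDigs m = [Nat.digitChar m] := by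
  rw [pvDigs]; simp [h]

theorem pvToDigitsCore_eq (fuel : Nat) : ∀ (n : Nat) (acc : List Char), n < fuel →
    Nat.toDigitsCore 10 fuel n acc = pvDigs n ++ acc := by
  induction fuel with
  | zero => intro n acc h; omega
  | succ fuel ih =>
    intro n acc h
    by_cases h10 : n / 10 = 0
    · have hlt : n < 10 := by
        rcases (Nat.div_eq_zero_iff).mp h10 with h' | h' <;> omega
      rw [pvDigs_lt10 n hlt]
      simp [Nat.toDigitsCore, h10, Nat.mod_eq_of_lt hlt]
    · have hge : ¬ n < 10 := by
        intro hc; exact h10 (by omega)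
      have hdiv : n / 10 < fuel := by
        have := Nat.div_lt_self (by omega : 0 < n) (by norm_num : 1 < 10)
        omega
      rw [pvDigs]
      simp [Nat.toDigitsCore, h10, ih (n / 10) _ hdiv, hge]

theorem pvToDigits_eq (m : Nat) : Nat.toDigits 10 m = pvDigs m :=
  by simpa using pvToDigitsCore_eq (m + 1) m [] (by omega)

theorem pvToChars_natCast (m : Nat) : PySem.Int.toChars (m : Int) = pvDigs m := by
  have hnn : ¬ ((m : Int) < 0) := by omega
  simp [PySem.Int.toChars, hnn, pvToDigits_eq]

theorem pvToStr_natCast (m : Nat) : PySem.Int.toStr (m : Int) = String.ofList (pvDigs m) := by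
  have hnn : ¬ ((m : Int) < 0) := by omega
  simp [PySem.Int.toStr, PySem.Int.toChars, hnn, pvToDigits_eq]

theorem pvDigs_cons (m : Nat) : ∃ c t, pvDigs m = c :: t ∧ (0 < m → c ≠ '0') := by
  induction m using Nat.strong_induction_on with
  | _ m ih =>
    by_cases h : m < 10
    · refine ⟨Nat.digitChar m, [], by simp [pvDigs, h], ?_⟩
      intro hm
      interval_cases m <;> decide
    · obtain ⟨c, t, hct, hc⟩ := ih (m / 10) (Nat.div_lt_self (by omega) (by norm_num))
      refine ⟨c, t ++ [Nat.digitChar (m % 10)], ?_, ?_⟩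
      · rw [pvDigs]; simp [h, hct]
      · intro _; exact hc (by omega)

theorem pvDigs_len3 (r : Nat) (h : r < 1000) : 1 ≤ (pvDigs r).length ∧ (pvDigs r).length ≤ 3 := by
  by_cases h1 : r < 10
  · simp [pvDigs_lt10 r h1]
  · by_cases h2 : r < 100
    · rw [pvDigs]; simp [h1, pvDigs_lt10 (r / 10) (by omega)]
    · rw [pvDigs]
      have h3 : ¬ r / 10 < 10 := by omega
      rw [pvDigs]
      simp [h1, h3, pvDigs_lt10 (r / 100) (by omega), Nat.div_div_eq_div_mul]

theorem pvPad3_digs (r : Nat) (h : r < 1000) :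
    pvPad3 (pvDigs r) = [Nat.digitChar (r / 100), Nat.digitChar (r / 10 % 10), Nat.digitChar (r % 10)] := by
  by_cases h1 : r < 10
  · have e0 : r / 100 = 0 := by omega
    have e1 : r / 10 = 0 := by omega
    have e2 : r % 10 = r := Nat.mod_eq_of_lt h1
    simp [pvPad3, pvDigs_lt10 r h1, e0, e1, e2, Nat.digitChar]
  · by_cases h2 : r < 100
    · have e0 : r / 100 = 0 := by omega
      have hd : pvDigs r = [Nat.digitChar (r / 10), Nat.digitChar (r % 10)] := by
        rw [pvDigs]; simp [h1, pvDigs_lt10 (r / 10) (by omega)]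
      have e1 : r / 10 % 10 = r / 10 := Nat.mod_eq_of_lt (by omega)
      simp [pvPad3, hd, e0, e1, Nat.digitChar]
    · have hd : pvDigs r = [Nat.digitChar (r / 100), Nat.digitChar (r / 10 % 10), Nat.digitChar (r % 10)] := by
        rw [pvDigs]
        have h3 : ¬ r / 10 < 10 := by omega
        rw [pvDigs]
        simp [h1, h3, pvDigs_lt10 (r / 100) (by omega), Nat.div_div_eq_div_mul]
      simp [pvPad3, hd]

theorem pvDigs_split (q r : Nat) (hq : 0 < q) (hr : r < 1000) :
    pvDigs (q * 1000 + r) = pvDigs q ++ pvPad3 (pvDigs r) := by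
  have e1 : (q * 1000 + r) / 10 = q * 100 + r / 10 := by omega
  have m1 : (q * 1000 + r) % 10 = r % 10 := by omega
  have e2 : (q * 100 + r / 10) / 10 = q * 10 + r / 100 := by omega
  have m2 : (q * 100 + r / 10) % 10 = r / 10 % 10 := by omega
  have e3 : (q * 10 + r / 100) / 10 = q := by omega
  have m3 : (q * 10 + r / 100) % 10 = r / 100 := by omega
  rw [pvDigs]
  simp only [show ¬ q * 1000 + r < 10 by omega, dite_false, e1, m1]
  rw [pvDigs]
  simp only [show ¬ q * 100 + r / 10 < 10 by omega, dite_false, e2, m2]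
  rw [pvDigs]
  simp only [show ¬ q * 10 + r / 100 < 10 by omega, dite_false, e3, m3]
  rw [pvPad3_digs r hr]
  simp

theorem pvStrip_pad3 (r : Nat) (hr : r < 1000) : pvStripOr0 (pvPad3 (pvDigs r)) = pvDigs r := by
  by_cases h0 : r = 0
  · subst h0
    have hd0 : pvDigs 0 = ['0'] := by rw [pvDigs_lt10 0 (by norm_num)]; rfl
    rw [hd0]; decide
  · obtain ⟨c, t, hct, hc⟩ := pvDigs_cons r
    have hc' : c ≠ '0' := hc (by omega)
    unfold pvStripOr0 pvPad3
    rw [hct, List.dropWhile_append]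
    have hrep : List.dropWhile (fun c => List.contains ['0'] c) (List.replicate (3 - (c :: t).length) '0') = [] := by
      rw [List.dropWhile_replicate]; simp
    have hpc : (List.contains ['0'] c) = false := by simp [hc']
    rw [hrep, List.dropWhile_cons]
    simp only [hpc, List.isEmpty_nil, if_true, Bool.false_eq_true, if_false]
    simp

-- A-side: the loop produces the reverse of pvT
theorem pvLoopA_eq (m : Nat) (hm : 0 < m) : ∀ acc, pvLoopA (m : Int) acc = acc ++ (pvT m).reverse := by
  induction m using Nat.strong_induction_on with
  | _ m ih =>
    intro acc
    have hfd : PySem.Int.floordiv (m : Int) 1000 = ((m / 1000 : Nat) : Int) := by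
      exact_mod_cast PySem.Int.floordiv_natCast m 1000
    have hmd : PySem.Int.mod (m : Int) 1000 = ((m % 1000 : Nat) : Int) := by
      exact_mod_cast PySem.Int.mod_natCast m 1000
    rw [pvLoopA]
    simp only [show (0:Int) < (m:Int) by exact_mod_cast hm, dite_true, hfd, hmd, pvToStr_natCast]
    by_cases h : m < 1000
    · have hq : m / 1000 = 0 := by omega
      have hr : m % 1000 = m := Nat.mod_eq_of_lt h
      rw [hq, hr]
      rw [pvLoopA]
      simp [pvT, h]
    · have hq : 0 < m / 1000 := by omega
      rw [ih (m / 1000) (Nat.div_lt_self (by omega) (by norm_num)) hq]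
      conv_rhs => rw [pvT]
      simp [h]

-- B-side helpers
theorem pvPadLen (L : Nat) (h1 : 1 ≤ L) (h3 : L ≤ 3) :
    (PySem.Int.mod (-(L : Int)) 3).toNat = 3 - L := by
  rw [PySem.Int.mod_eq_emod_of_pos (by norm_num)]
  omega

theorem pvPadLen_add3 (L : Nat) :
    PySem.Int.mod (-((L : Int) + 3)) 3 = PySem.Int.mod (-(L : Int)) 3 := by
  rw [PySem.Int.mod_eq_emod_of_pos (by norm_num), PySem.Int.mod_eq_emod_of_pos (by norm_num)]
  omega

-- the padded decimal string of m
def pvSPad (m : Nat) : List Char :=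
  List.replicate ((PySem.Int.mod (-((pvDigs m).length : Int)) 3).toNat) '0' ++ pvDigs m

theorem pvSPad_base (m : Nat) (_h0 : 0 < m) (h : m < 1000) : pvSPad m = pvPad3 (pvDigs m) := by
  obtain ⟨hl1, hl3⟩ := pvDigs_len3 m h
  unfold pvSPad pvPad3
  rw [pvPadLen _ hl1 hl3]

theorem pvSPad_step (m : Nat) (h : ¬ m < 1000) :
    pvSPad m = pvSPad (m / 1000) ++ pvPad3 (pvDigs (m % 1000)) := by
  have hsplit : pvDigs m = pvDigs (m / 1000) ++ pvPad3 (pvDigs (m % 1000)) := by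
    have := pvDigs_split (m / 1000) (m % 1000) (by omega) (by omega)
    have hm : m / 1000 * 1000 + m % 1000 = m := by omega
    rwa [hm] at this
  unfold pvSPad
  rw [hsplit]
  have hlen : (pvPad3 (pvDigs (m % 1000))).length = 3 := by
    rw [pvPad3_digs _ (by omega)]; rfl
  rw [List.length_append, hlen]
  rw [show (((pvDigs (m / 1000)).length + 3 : Nat) : Int) = ((pvDigs (m / 1000)).length : Int) + 3 by push_cast; ring]
  rw [pvPadLen_add3]
  simp [List.append_assoc]

theorem pvDigs_len_pos (m : Nat) : 0 < (pvDigs m).length := by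
  obtain ⟨c, t, hct, -⟩ := pvDigs_cons m
  simp [hct]

theorem pvSPad_len_mod3 (m : Nat) : (pvSPad m).length % 3 = 0 := by
  unfold pvSPad
  rw [List.length_append, List.length_replicate, PySem.Int.mod_eq_emod_of_pos (by norm_num)]
  omega

theorem pvSPad_len_pos (m : Nat) : 0 < (pvSPad m).length := by
  unfold pvSPad
  rw [List.length_append]
  have := pvDigs_len_pos m
  omega

-- range(0, b+3, 3) splits off its last index when 3 ∣ b
theorem pvRange3_snoc (b : Nat) (hb : 0 < b) (h3 : b % 3 = 0) :
    PySem.List.pyRange 0 ((b : Int) + 3) 3 = PySem.List.pyRange 0 (b : Int) 3 ++ [(b : Int)] := by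
  rw [PySem.List.pyRange_of_pos _ _ (by norm_num), PySem.List.pyRange_of_pos _ _ (by norm_num)]
  have e1 : (((b : Int) + 3 - 0 + 3 - 1) / 3).toNat = b / 3 + 1 := by omega
  have e2 : (((b : Int) - 0 + 3 - 1) / 3).toNat = b / 3 := by omega
  simp only [show (0:Int) < (b:Int) + 3 by positivity, if_pos, show (0:Int) < (b:Int) by exact_mod_cast hb, e1, e2]
  rw [List.range_succ, List.map_append]
  congr 1
  simp
  omega

-- B's token map equals pvT
theorem pvBmap_eq (m : Nat) (hm : 0 < m) :
    (PySem.List.pyRange 0 ((pvSPad m).length : Int) 3).map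
      (fun i => String.ofList (pvStripOr0 (PySem.List.slice (pvSPad m) (some i) (some (i + 3))))) = pvT m := by
  induction m using Nat.strong_induction_on with
  | _ m ih =>
    by_cases h : m < 1000
    · rw [pvSPad_base m hm h]
      have hlen : (pvPad3 (pvDigs m)).length = 3 := by rw [pvPad3_digs m h]; rfl
      rw [hlen]
      have hr : PySem.List.pyRange 0 (3 : Int) 3 = [0] := by decide
      rw [show ((3 : Nat) : Int) = (3 : Int) by norm_num, hr]
      simp only [List.map]
      have hsl : PySem.List.slice (pvPad3 (pvDigs m)) (some 0) (some (0 + 3)) = pvPad3 (pvDigs m) := by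
        rw [PySem.List.slice_toNat _ (by norm_num) (by norm_num)]
        simp [List.take_of_length_le, hlen]
      rw [hsl, pvStrip_pad3 m h, pvT]
      simp [h]
    · rw [pvSPad_step m h]
      have hBlen : (pvPad3 (pvDigs (m % 1000))).length = 3 := by rw [pvPad3_digs _ (by omega)]; rfl
      have hX3 : (pvSPad (m / 1000)).length % 3 = 0 := pvSPad_len_mod3 _
      have hXpos : 0 < (pvSPad (m / 1000)).length := pvSPad_len_pos _
      rw [List.length_append, hBlen]
      rw [show (((pvSPad (m / 1000)).length + 3 : Nat) : Int) = ((pvSPad (m / 1000)).length : Int) + 3 by push_cast; ring]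
      rw [pvRange3_snoc _ hXpos hX3, List.map_append]
      have hq : 0 < m / 1000 := by omega
      conv_rhs => rw [pvT]
      simp only [show ¬ m < 1000 from h, dite_false]
      congr 1
      · rw [← ih (m / 1000) (Nat.div_lt_self (by omega) (by norm_num)) hq]
        apply List.map_congr_left
        intro i hi
        obtain ⟨hi0, hilt, hidvd⟩ := (PySem.List.mem_pyRange_iff_of_pos (by norm_num) i).mp hi
        have hi3 : i.toNat + 3 ≤ (pvSPad (m / 1000)).length := by omega
        congr 1
        rw [PySem.List.slice_toNat _ hi0 (by omega), PySem.List.slice_toNat _ hi0 (by omega)]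
        rw [List.drop_append_of_le_length (by omega)]
        have ht3 : (i + 3).toNat - i.toNat = 3 := by omega
        rw [ht3, List.take_append_of_le_length (by simp; omega)]
      · simp only [List.map]
        have hsl : PySem.List.slice (pvSPad (m / 1000) ++ pvPad3 (pvDigs (m % 1000)))
            (some ((pvSPad (m / 1000)).length : Int)) (some (((pvSPad (m / 1000)).length : Int) + 3)) =
            pvPad3 (pvDigs (m % 1000)) := by
          rw [PySem.List.slice_toNat _ (by positivity) (by positivity)]
          have ht3 : (((pvSPad (m / 1000)).length : Int) + 3).toNat - ((pvSPad (m / 1000)).length : Int).toNat = 3 := by omega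
          rw [ht3, show ((pvSPad (m / 1000)).length : Int).toNat = (pvSPad (m / 1000)).length by omega]
          rw [List.drop_left, List.take_of_length_le (by omega)]
        rw [hsl, pvStrip_pad3 _ (by omega)]

-- ===== VERDICT (by name: the statement is the Claim_ definition above) =====
theorem encode_base1000_spec : Claim_equal_encode_base1000 := by
  intro n _
  unfold Spec_encode_base1000 encode_base1000 encode_base1000_alt
  by_cases hz : n = 0
  · simp [hz]
  · have hne : (n == 0) = false := by simp [hz]
    rw [hne]
    simp only [Bool.false_eq_true, if_false]
    have habs : |n| = ((n.natAbs : Nat) : Int) := by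
      rw [Int.abs_eq_natAbs]
    have hm : 0 < n.natAbs := Int.natAbs_pos.mpr hz
    rw [habs, pvLoopA_eq n.natAbs hm, pvToChars_natCast]
    rw [show (List.replicate ((PySem.Int.mod (-((pvDigs n.natAbs).length : Int)) 3).toNat) '0' ++ pvDigs n.natAbs) = pvSPad n.natAbs from rfl]
    rw [pvBmap_eq n.natAbs hm]
    simp
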